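-- pv_equiv track=rewrite | github.com/DSIMB/ICARUS | icarus.py | draw_inter_pus_as_blank
-- ===== SOURCE A (Python) =====
-- def draw_inter_pus_as_blank(line_PU_connection, PUs_delim_to_keep, new_delims):
--     """
--                                              ↓↓↓
--     Set the inter PUs as blank: :  +--------+   +-----------+
--
--     Args:
--         - line_PU_connection (str): line of the PUs connections
--         - PUs_delim_to_keep (list): list of PU delimitations to keep
--         - new_delims (dict): keys are the original delimitations and values are the new delimitations
--
--     Returns:
--         - line_PU_connection (str): line of the PUs connections
--     """
--     for i in range(len(PUs_delim_to_keep) - 1):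
--         if PUs_delim_to_keep[i] in new_delims and PUs_delim_to_keep[i + 1] in new_delims:
--             if i % 2 != 0:
--                 begin = new_delims[PUs_delim_to_keep[i]]
--                 stop = new_delims[PUs_delim_to_keep[i + 1]]
--                 # Check that there is something to remove between 2 PUs
--                 if (stop - begin) > 1:
--                     nb_to_replace = stop - begin - 1
--                     line_PU_connection = line_PU_connection[:begin] + \
--                                             " " * nb_to_replace + \
--                                             line_PU_connection[stop-1:]
--     return line_PU_connection
-- ===== SOURCE B (Python) =====
-- def draw_inter_pus_as_blank(line_PU_connection, PUs_delim_to_keep, new_delims):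
--     # Mark the positions to blank first, then rebuild the line in one pass.
--     blank = set()
--     for i in range(1, len(PUs_delim_to_keep) - 1, 2):
--         if PUs_delim_to_keep[i] in new_delims and PUs_delim_to_keep[i + 1] in new_delims:
--             begin = new_delims[PUs_delim_to_keep[i]]
--             stop = new_delims[PUs_delim_to_keep[i + 1]]
--             if stop - begin > 1:
--                 blank.update(range(begin, stop - 1))
--     return "".join(" " if j in blank else c for j, c in enumerate(line_PU_connection))
-- ===== Notes on version B (the rewrite author's own statement) =====
-- stated objective: alternative
-- what changed: B first collects the set of positions to blank from the kept delimiter pairs (iterating the odd indices directly with a step-2 range), then rebuilds the line in one pass over its characters, instead of A's repeated slice-and-concatenate of the whole string per pair.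
-- outside the precondition, e.g. on draw_inter_pus_as_blank('abc', [0, 1, 2, 3], {1: 0, 2: 9}): A returns '        ', B returns '   '
import Mathlib
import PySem

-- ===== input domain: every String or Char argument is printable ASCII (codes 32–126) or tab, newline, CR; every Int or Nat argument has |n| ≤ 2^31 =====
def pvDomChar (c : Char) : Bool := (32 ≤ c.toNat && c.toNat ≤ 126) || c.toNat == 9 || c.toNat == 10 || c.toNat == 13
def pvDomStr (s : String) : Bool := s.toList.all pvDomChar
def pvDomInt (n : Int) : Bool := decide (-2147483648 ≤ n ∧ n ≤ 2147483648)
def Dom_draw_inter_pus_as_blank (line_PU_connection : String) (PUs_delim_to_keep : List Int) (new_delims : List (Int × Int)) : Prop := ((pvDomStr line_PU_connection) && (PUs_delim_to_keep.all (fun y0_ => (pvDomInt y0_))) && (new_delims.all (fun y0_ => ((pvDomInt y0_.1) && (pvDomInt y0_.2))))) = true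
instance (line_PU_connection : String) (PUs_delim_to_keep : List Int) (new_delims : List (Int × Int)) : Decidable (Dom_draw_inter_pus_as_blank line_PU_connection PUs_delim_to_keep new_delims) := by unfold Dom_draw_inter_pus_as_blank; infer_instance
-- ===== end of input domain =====

-- B marks the positions to blank in a set first and rebuilds the line in one character pass,
-- instead of A's repeated slice-and-concatenate; objective: alternative decomposition, not speed.

-- ===== PORT A =====
-- one iteration of A's loop body (state = the current line as a character list)
def pvStepA (new_delims : List (Int × Int)) (PUs_delim_to_keep : List Int)
    (cs : List Char) (i : Int) : List Char :=
  if (List.lookup (PySem.List.pyGetD PUs_delim_to_keep i 0) new_delims).isSome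
      && (List.lookup (PySem.List.pyGetD PUs_delim_to_keep (i+1) 0) new_delims).isSome then
    if PySem.Int.mod i 2 ≠ 0 then
      let begin_ := (List.lookup (PySem.List.pyGetD PUs_delim_to_keep i 0) new_delims).getD 0
      let stop := (List.lookup (PySem.List.pyGetD PUs_delim_to_keep (i+1) 0) new_delims).getD 0
      if stop - begin_ > 1 then
        PySem.List.slice cs none (some begin_)
          ++ List.replicate (stop - begin_ - 1).toNat ' '
          ++ PySem.List.slice cs (some (stop - 1)) none
      else cs
    else cs
  else cs

def draw_inter_pus_as_blank (line_PU_connection : String) (PUs_delim_to_keep : List Int) (new_delims : List (Int × Int)) : String :=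
  String.ofList ((PySem.List.pyRange 0 ((PUs_delim_to_keep.length : Int) - 1) 1).foldl
    (pvStepA new_delims PUs_delim_to_keep) line_PU_connection.toList)

-- ===== PORT B =====
-- one iteration of B's marking loop (state = the set of positions to blank)
def pvStepB (new_delims : List (Int × Int)) (PUs_delim_to_keep : List Int)
    (S : PySem.Set Int) (i : Int) : PySem.Set Int :=
  match List.lookup (PySem.List.pyGetD PUs_delim_to_keep i 0) new_delims,
        List.lookup (PySem.List.pyGetD PUs_delim_to_keep (i+1) 0) new_delims with
  | some begin_, some stop =>
      if stop - begin_ > 1 then S.update (PySem.List.pyRange begin_ (stop - 1) 1) else S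
  | _, _ => S

def draw_inter_pus_as_blank_alt (line_PU_connection : String) (PUs_delim_to_keep : List Int) (new_delims : List (Int × Int)) : String :=
  let blank : PySem.Set Int :=
    (PySem.List.pyRange 1 ((PUs_delim_to_keep.length : Int) - 1) 2).foldl
      (pvStepB new_delims PUs_delim_to_keep) PySem.Set.empty
  String.ofList ((PySem.List.enumerate line_PU_connection.toList 0).map
    (fun p => if p.1 ∈ blank then ' ' else p.2))

-- ===== PRECONDITION & SPEC =====
-- Pre_ restricts to the natural domain: every kept delimitation pair that A actually blanks must map
-- inside the line (0 ≤ begin and stop ≤ len+1); outside it A's slicing silently truncates or extends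
-- the line instead of blanking, which B does not reproduce.
def Pre_draw_inter_pus_as_blank (line_PU_connection : String) (PUs_delim_to_keep : List Int) (new_delims : List (Int × Int)) : Prop :=
  ∀ i ∈ PySem.List.pyRange 1 ((PUs_delim_to_keep.length : Int) - 1) 2,
    ((List.lookup (PySem.List.pyGetD PUs_delim_to_keep i 0) new_delims).isSome
      ∧ (List.lookup (PySem.List.pyGetD PUs_delim_to_keep (i+1) 0) new_delims).isSome
      ∧ (List.lookup (PySem.List.pyGetD PUs_delim_to_keep (i+1) 0) new_delims).getD 0
          - (List.lookup (PySem.List.pyGetD PUs_delim_to_keep i 0) new_delims).getD 0 > 1) →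
    (0 ≤ (List.lookup (PySem.List.pyGetD PUs_delim_to_keep i 0) new_delims).getD 0
      ∧ (List.lookup (PySem.List.pyGetD PUs_delim_to_keep (i+1) 0) new_delims).getD 0
          ≤ (line_PU_connection.toList.length : Int) + 1)

instance (line_PU_connection : String) (PUs_delim_to_keep : List Int) (new_delims : List (Int × Int)) : Decidable (Pre_draw_inter_pus_as_blank line_PU_connection PUs_delim_to_keep new_delims) := by unfold Pre_draw_inter_pus_as_blank; infer_instance

def pvWitness_draw_inter_pus_as_blank : String × List Int × (List (Int × Int)) :=
  ("ab+cd", [0, 1, 4, 5], [(0, 0), (1, 1), (4, 4), (5, 5)])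

def Spec_draw_inter_pus_as_blank (line_PU_connection : String) (PUs_delim_to_keep : List Int) (new_delims : List (Int × Int)) (out : String) : Prop := out = draw_inter_pus_as_blank_alt line_PU_connection PUs_delim_to_keep new_delims
instance (line_PU_connection : String) (PUs_delim_to_keep : List Int) (new_delims : List (Int × Int)) (out : String) : Decidable (Spec_draw_inter_pus_as_blank line_PU_connection PUs_delim_to_keep new_delims out) := by unfold Spec_draw_inter_pus_as_blank; infer_instance

-- ===== CLAIM (what is proved, stated in full; the proofs are below) =====
def Claim_equal_draw_inter_pus_as_blank : Prop := ∀ (line_PU_connection : String) (PUs_delim_to_keep : List Int) (new_delims : List (Int × Int)), Dom_draw_inter_pus_as_blank line_PU_connection PUs_delim_to_keep new_delims → Pre_draw_inter_pus_as_blank line_PU_connection PUs_delim_to_keep new_delims → Spec_draw_inter_pus_as_blank line_PU_connection PUs_delim_to_keep new_delims (draw_inter_pus_as_blank line_PU_connection PUs_delim_to_keep new_delims)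

-- ===== LEMMAS AND PROOFS =====

-- masking a list of characters by a predicate on positions
def pvMask (f : Int → Bool) (cs : List Char) : List Char :=
  cs.mapIdx (fun j c => if f (j : Int) then ' ' else c)

theorem pvMask_length (f : Int → Bool) (cs : List Char) : (pvMask f cs).length = cs.length := by
  simp [pvMask]

theorem pvMask_false (cs : List Char) : pvMask (fun _ => false) cs = cs := by
  apply List.ext_getElem
  · simp [pvMask]
  · intro k h1 h2
    simp [pvMask]

theorem pvMask_congr (f g : Int → Bool) (cs : List Char) (h : ∀ j, f j = g j) :
    pvMask f cs = pvMask g cs := by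
  have : f = g := funext h
  rw [this]

theorem pvMask_mask (f g : Int → Bool) (cs : List Char) :
    pvMask f (pvMask g cs) = pvMask (fun j => g j || f j) cs := by
  apply List.ext_getElem
  · simp [pvMask]
  · intro k h1 h2
    simp only [pvMask, List.getElem_mapIdx]
    by_cases hf : f (k : Int) <;> by_cases hg : g (k : Int) <;> simp [hf, hg]

theorem pvEnum_map_eq_mask (cs : List Char) (f : Int → Bool) :
    (PySem.List.enumerate cs 0).map (fun p => if f p.1 then ' ' else p.2) = pvMask f cs := by
  apply List.ext_getElem
  · simp [pvMask, PySem.List.length_enumerate]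
  · intro k h1 h2
    simp [pvMask, PySem.List.getElem_enumerate, List.getElem_mapIdx]

-- one in-range blanking operation is a mask over an interval
theorem pvStep_eq_mask (cs : List Char) (b0 s0 : Int)
    (hb : 0 ≤ b0) (hs : s0 ≤ (cs.length : Int) + 1) (hgap : s0 - b0 > 1) :
    PySem.List.slice cs none (some b0) ++ List.replicate (s0 - b0 - 1).toNat ' '
        ++ PySem.List.slice cs (some (s0 - 1)) none
      = pvMask (fun j => decide (b0 ≤ j ∧ j < s0 - 1)) cs := by
  rw [PySem.List.slice_to cs hb, PySem.List.slice_from cs (by omega)]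
  have hlx : (List.take b0.toNat cs).length = b0.toNat := by simp; omega
  have hl2 : (List.take b0.toNat cs ++ List.replicate (s0 - b0 - 1).toNat ' ').length
      = b0.toNat + (s0 - b0 - 1).toNat := by simp; omega
  apply List.ext_getElem
  · simp [pvMask]
    omega
  · intro k h1 h2
    simp only [pvMask, List.length_mapIdx] at h2
    simp only [pvMask, List.getElem_mapIdx]
    by_cases hk1 : k < b0.toNat
    · rw [List.getElem_append_left (by rw [hl2]; omega),
          List.getElem_append_left (by rw [hlx]; omega), List.getElem_take]
      have hcond : ¬ (b0 ≤ (k : Int) ∧ (k : Int) < s0 - 1) := by omega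
      simp [hcond]
    · by_cases hk2 : k < b0.toNat + (s0 - b0 - 1).toNat
      · rw [List.getElem_append_left (by rw [hl2]; omega),
            List.getElem_append_right (by rw [hlx]; omega), List.getElem_replicate]
        have hcond : b0 ≤ (k : Int) ∧ (k : Int) < s0 - 1 := by omega
        simp [hcond]
      · rw [List.getElem_append_right (by rw [hl2]; omega), List.getElem_drop]
        have hcond : ¬ (b0 ≤ (k : Int) ∧ (k : Int) < s0 - 1) := by omega
        rw [if_neg (by simpa using hcond)]
        congr 1
        rw [hl2]
        omega

-- the step-2 range peels one element at a time
theorem pvRange_two_cons (a b : Int) (h : a < b) :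
    PySem.List.pyRange a b 2 = a :: PySem.List.pyRange (a + 2) b 2 := by
  rw [PySem.List.pyRange_of_pos a b (by norm_num),
      PySem.List.pyRange_of_pos (a + 2) b (by norm_num)]
  by_cases h2 : a + 2 < b
  · have hc : (if a < b then ((b - a + 2 - 1) / 2).toNat else 0)
        = (if a + 2 < b then ((b - (a + 2) + 2 - 1) / 2).toNat else 0) + 1 := by
      simp only [h, h2, if_pos]
      omega
    rw [hc, List.range_succ_eq_map, List.map_cons, List.map_map]
    congr 1
    · simp
    · apply List.map_congr_left
      intro k _
      simp only [Function.comp_apply]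
      push_cast
      ring
  · have hc : (if a < b then ((b - a + 2 - 1) / 2).toNat else 0) = 1 := by
      simp only [h, if_pos]; omega
    have hc2 : (if a + 2 < b then ((b - (a + 2) + 2 - 1) / 2).toNat else 0) = 0 := by
      simp [h2]
    rw [hc, hc2]
    simp

-- adding 2 preserves evenness for PySem.Int.mod
theorem pvMod_add_two (a : Int) (h : PySem.Int.mod a 2 = 0) : PySem.Int.mod (a + 2) 2 = 0 := by
  rw [PySem.Int.mod_eq_emod_of_pos (by norm_num : (0:Int) < 2)] at h ⊢
  omega

-- A's fold over the full range equals its fold over the odd positions only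
theorem pvThin (nd : List (Int × Int)) (PUs : List Int) :
    ∀ (d : Nat) (a b : Int), (b - a).toNat = d → PySem.Int.mod a 2 = 0 →
    ∀ cs, (PySem.List.pyRange a b 1).foldl (pvStepA nd PUs) cs
        = (PySem.List.pyRange (a + 1) b 2).foldl (pvStepA nd PUs) cs := by
  intro d
  induction d using Nat.strong_induction_on with
  | _ d ih =>
    intro a b hd hmod cs
    by_cases hab : a < b
    · rw [PySem.List.pyRange_one_cons hab]
      have hA : pvStepA nd PUs cs a = cs := by
        simp only [pvStepA, hmod]
        split <;> simp
      rw [List.foldl_cons, hA]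
      by_cases hab1 : a + 1 < b
      · rw [PySem.List.pyRange_one_cons hab1, pvRange_two_cons (a + 1) b hab1]
        simp only [List.foldl_cons]
        have hrec := ih (b - (a + 2)).toNat (by omega) (a + 2) b rfl
          (pvMod_add_two a hmod) (pvStepA nd PUs cs (a + 1))
        rw [show a + 1 + 1 = a + 2 from by ring, hrec, show a + 2 + 1 = a + 1 + 2 from by ring]
      · rw [PySem.List.pyRange_one_eq_nil (by omega)]
        rw [PySem.List.pyRange_of_pos (a + 1) b (by norm_num)]
        simp [show ¬ (a + 1 < b) from hab1]
    · rw [PySem.List.pyRange_one_eq_nil (by omega)]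
      rw [PySem.List.pyRange_of_pos (a + 1) b (by norm_num)]
      simp [show ¬ (a + 1 < b) from (by omega)]

-- the invariant: A's painting fold on a masked line equals the mask by B's set fold
theorem pvInv (nd : List (Int × Int)) (PUs : List Int) (cs : List Char) :
    ∀ (is : List Int) (S : PySem.Set Int),
    (∀ i ∈ is, PySem.Int.mod i 2 = 1 ∧
      (((List.lookup (PySem.List.pyGetD PUs i 0) nd).isSome
         ∧ (List.lookup (PySem.List.pyGetD PUs (i+1) 0) nd).isSome
         ∧ (List.lookup (PySem.List.pyGetD PUs (i+1) 0) nd).getD 0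
             - (List.lookup (PySem.List.pyGetD PUs i 0) nd).getD 0 > 1) →
       (0 ≤ (List.lookup (PySem.List.pyGetD PUs i 0) nd).getD 0
         ∧ (List.lookup (PySem.List.pyGetD PUs (i+1) 0) nd).getD 0 ≤ (cs.length : Int) + 1))) →
    is.foldl (pvStepA nd PUs) (pvMask (fun j => decide (j ∈ S)) cs)
      = pvMask (fun j => decide (j ∈ is.foldl (pvStepB nd PUs) S)) cs := by
  intro is
  induction is with
  | nil => intro S _; rfl
  | cons i is ih =>
    intro S hyp
    obtain ⟨hmod, hbound⟩ := hyp i (List.mem_cons_self ..)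
    simp only [List.foldl_cons]
    have htail := fun j hj => hyp j (List.mem_cons_of_mem _ hj)
    rcases hk1 : List.lookup (PySem.List.pyGetD PUs i 0) nd with _ | b0
    · have hA : pvStepA nd PUs (pvMask (fun j => decide (j ∈ S)) cs) i
          = pvMask (fun j => decide (j ∈ S)) cs := by
        simp [pvStepA, hk1]
      have hB : pvStepB nd PUs S i = S := by
        simp [pvStepB, hk1]
      rw [hA]
      refine (ih S htail).trans (pvMask_congr _ _ cs ?_)
      intro j
      simp [hB]
    · rcases hk2 : List.lookup (PySem.List.pyGetD PUs (i+1) 0) nd with _ | s0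
      · have hA : pvStepA nd PUs (pvMask (fun j => decide (j ∈ S)) cs) i
            = pvMask (fun j => decide (j ∈ S)) cs := by
          simp [pvStepA, hk1, hk2]
        have hB : pvStepB nd PUs S i = S := by
          simp [pvStepB, hk1, hk2]
        rw [hA]
        refine (ih S htail).trans (pvMask_congr _ _ cs ?_)
        intro j
        simp [hB]
      · by_cases hgap : s0 - b0 > 1
        · have hbnd : 0 ≤ b0 ∧ s0 ≤ (cs.length : Int) + 1 := by
            have := hbound (by simp [hk1, hk2]; omega)
            simpa [hk1, hk2] using this
          have hA : pvStepA nd PUs (pvMask (fun j => decide (j ∈ S)) cs) i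
              = pvMask (fun j => decide (j ∈ S.update (PySem.List.pyRange b0 (s0 - 1) 1))) cs := by
            simp only [pvStepA, hk1, hk2, Option.isSome_some, Bool.and_self, if_pos, hmod,
              Option.getD_some]
            rw [if_pos (by norm_num), if_pos hgap]
            rw [pvStep_eq_mask _ b0 s0 hbnd.1 (by rw [pvMask_length]; exact hbnd.2) hgap]
            rw [pvMask_mask]
            apply pvMask_congr
            intro j
            simp [PySem.Set.mem_update, PySem.List.mem_pyRange_one]
          have hB : pvStepB nd PUs S i = S.update (PySem.List.pyRange b0 (s0 - 1) 1) := by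
            simp [pvStepB, hk1, hk2, hgap]
          rw [hA]
          refine (ih _ htail).trans (pvMask_congr _ _ cs ?_)
          intro j
          simp [hB]
        · have hA : pvStepA nd PUs (pvMask (fun j => decide (j ∈ S)) cs) i
              = pvMask (fun j => decide (j ∈ S)) cs := by
            simp only [pvStepA, hk1, hk2, Option.isSome_some, Bool.and_self, if_pos, hmod,
              Option.getD_some]
            rw [if_pos (by norm_num), if_neg hgap]
          have hB : pvStepB nd PUs S i = S := by
            simp [pvStepB, hk1, hk2, hgap]
          rw [hA]
          refine (ih S htail).trans (pvMask_congr _ _ cs ?_)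
          intro j
          simp [hB]

-- members of the odd step-2 range are odd
theorem pvOdd_of_mem (a : Int) (L : Int) (h : a ∈ PySem.List.pyRange 1 L 2) :
    PySem.Int.mod a 2 = 1 := by
  rw [PySem.List.mem_pyRange_iff_of_pos (by norm_num)] at h
  rw [PySem.Int.mod_eq_emod_of_pos (by norm_num : (0:Int) < 2)]
  obtain ⟨h1, h2, k, hk⟩ := h
  omega

-- ===== VERDICT (by name: the statement is the Claim_ definition above) =====
theorem draw_inter_pus_as_blank_spec : Claim_equal_draw_inter_pus_as_blank := by
  intro line PUs nd _ hpre
  unfold Spec_draw_inter_pus_as_blank draw_inter_pus_as_blank draw_inter_pus_as_blank_alt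
  rw [pvThin nd PUs ((((PUs.length : Int) - 1) - 0).toNat) 0 _ rfl (by decide)]
  have hmask0 : line.toList
      = pvMask (fun j => decide (j ∈ (PySem.Set.empty : PySem.Set Int))) line.toList := by
    have : (fun (j : Int) => decide (j ∈ (PySem.Set.empty : PySem.Set Int)))
        = (fun _ => false) := by
      funext j
      simp [PySem.Set.empty]
    rw [this, pvMask_false]
  conv_lhs => rw [hmask0]
  rw [show (0 : Int) + 1 = 1 from rfl]
  rw [pvInv nd PUs line.toList _ PySem.Set.empty
    (fun i hi => ⟨pvOdd_of_mem i _ hi, fun hg => hpre i hi hg⟩)]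
  congr 1
  rw [← pvEnum_map_eq_mask line.toList
    (fun j => decide (j ∈ List.foldl (pvStepB nd PUs) PySem.Set.empty
      (PySem.List.pyRange 1 ((PUs.length : Int) - 1) 2)))]
  simp
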